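-- pv_equiv track=rewrite | github.com/qiskit-community/qiskit-textbook | scripts/conversion/ipynb2rst.py | _add_contents
-- ===== SOURCE A (Python) =====
-- def _add_contents(lines):
--     out = []
--     count = 0
--     for line in lines:
--       count += 1
--       out.append(line)
--       if count == 2:
--         out.extend(_local_contents())
--
--     return out
--
-- def _local_contents():
--   return (
--     '.. contents:: Contents',
--     '   :local:',
--     '')
-- ===== SOURCE B (Python) =====
-- def _add_contents(lines):
--     lines = list(lines)
--     if len(lines) < 2:
--         return lines
--     return lines[:2] + list(_local_contents()) + lines[2:]
--
-- def _local_contents():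
--   return (
--     '.. contents:: Contents',
--     '   :local:',
--     '')
-- ===== Notes on version B (the rewrite author's own statement) =====
-- stated objective: simpler
-- what changed: Replaces the counting loop with append/extend by a guarded slice-splice: lines[:2] + TOC + lines[2:] when there are at least two lines, else the list unchanged.
import Mathlib
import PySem

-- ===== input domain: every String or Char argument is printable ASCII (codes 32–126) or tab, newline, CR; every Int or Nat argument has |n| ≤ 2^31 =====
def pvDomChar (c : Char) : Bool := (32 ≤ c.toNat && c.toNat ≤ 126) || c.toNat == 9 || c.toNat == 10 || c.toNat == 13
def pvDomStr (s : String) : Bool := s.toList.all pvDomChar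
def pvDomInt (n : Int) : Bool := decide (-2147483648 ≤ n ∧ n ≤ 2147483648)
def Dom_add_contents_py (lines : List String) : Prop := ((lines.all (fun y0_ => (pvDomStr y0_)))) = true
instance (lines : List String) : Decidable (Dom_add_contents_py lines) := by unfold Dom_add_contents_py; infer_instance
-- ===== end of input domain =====

-- B replaces A's counting loop by a guarded slice-splice (simpler decomposition).


-- ===== PORT A =====
def local_contents_py : List String :=
  [".. contents:: Contents", "   :local:", ""]

def add_contents_step (s : List String × Int) (line : String) : List String × Int :=
  let count := s.2 + 1
  let out := s.1 ++ [line]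
  if count = 2 then (out ++ local_contents_py, count) else (out, count)

def add_contents_py (lines : List String) : List String :=
  (lines.foldl add_contents_step ([], 0)).1

-- ===== PORT B =====
def local_contents_py_alt : List String :=
  [".. contents:: Contents", "   :local:", ""]

def add_contents_py_alt (lines : List String) : List String :=
  if lines.length < 2 then lines
  else lines.take 2 ++ local_contents_py_alt ++ lines.drop 2

-- ===== PRECONDITION & SPEC =====
def Spec_add_contents_py (lines : List String) (out : List String) : Prop := out = add_contents_py_alt lines
instance (lines : List String) (out : List String) : Decidable (Spec_add_contents_py lines out) := by unfold Spec_add_contents_py; infer_instance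

-- ===== CLAIM (what is proved, stated in full; the proofs are below) =====
def Claim_equal_add_contents_py : Prop := ∀ (lines : List String), Dom_add_contents_py lines → Spec_add_contents_py lines (add_contents_py lines)

-- ===== LEMMAS AND PROOFS =====
-- Once the counter is ≥ 2, the loop body only appends each remaining line.
theorem add_contents_loop_tail (rest : List String) :
    ∀ (out : List String) (c : Int), 2 ≤ c →
    (rest.foldl add_contents_step (out, c)).1 = out ++ rest := by
  induction rest with
  | nil => intro out c _; simp
  | cons x xs ih =>
    intro out c hc
    have hne : c + 1 ≠ 2 := by omega
    simp only [List.foldl_cons, add_contents_step, if_neg hne]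
    rw [ih (out ++ [x]) (c + 1) (by omega)]
    simp

-- ===== VERDICT (by name: the statement is the Claim_ definition above) =====
theorem add_contents_py_spec : Claim_equal_add_contents_py := by
  intro lines _
  unfold Spec_add_contents_py add_contents_py add_contents_py_alt
  match lines with
  | [] => simp
  | [a] => simp [add_contents_step]
  | a :: b :: rest =>
    simp only [List.foldl_cons]
    have h1 : add_contents_step ([], 0) a = ([a], 1) := by
      simp [add_contents_step]
    have h2 : add_contents_step ([a], 1) b = ([a] ++ [b] ++ local_contents_py, 2) := by
      simp [add_contents_step]
    rw [h1, h2, add_contents_loop_tail rest ([a] ++ [b] ++ local_contents_py) 2 (by omega)]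
    simp [local_contents_py, local_contents_py_alt]
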